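-- pv_equiv track=rewrite | github.com/actuallyrizzn/ucw | generator/file_writer.py | _extract_wrapper_code
-- ===== SOURCE A (Python) =====
-- def _extract_wrapper_code(plugin_code: str, command_name: str) -> str:
--     """Extract the command-specific code from plugin code."""
--     # Extract only the command-specific functions, not the full plugin structure
--     lines = plugin_code.split('\n')
--     command_lines = []
--     in_command_section = False
--
--     for line in lines:
--         # Look for command-specific functions
--         if (line.strip().startswith(f'def setup_execute_command') or
--             line.strip().startswith(f'def execute_command')):
--             in_command_section = True
--
--         if in_command_section:
--             command_lines.append(line)
--
--             # Stop at the end of the execute_command function (before if __name__)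
--             if line.strip().startswith('if __name__'):
--                 break
--
--     return '\n'.join(command_lines)
-- ===== SOURCE B (Python) =====
-- def _extract_wrapper_code(plugin_code: str, command_name: str) -> str:
--     """Extract the command-specific code from plugin code."""
--     lines = plugin_code.split('\n')
--     start = next((i for i, line in enumerate(lines)
--                   if line.strip().startswith('def setup_execute_command')
--                   or line.strip().startswith('def execute_command')), None)
--     if start is None:
--         return ''
--     tail = lines[start:]
--     end = next((j for j, line in enumerate(tail)
--                 if line.strip().startswith('if __name__')), None)
--     section = tail if end is None else tail[:end + 1]
--     return '\n'.join(section)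
-- ===== Notes on version B (the rewrite author's own statement) =====
-- stated objective: simpler
-- what changed: Replaces the stateful flag-and-break accumulation loop by explicit boundary detection: find the first start line and the first terminator at or after it, then join one slice.
import Mathlib
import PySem

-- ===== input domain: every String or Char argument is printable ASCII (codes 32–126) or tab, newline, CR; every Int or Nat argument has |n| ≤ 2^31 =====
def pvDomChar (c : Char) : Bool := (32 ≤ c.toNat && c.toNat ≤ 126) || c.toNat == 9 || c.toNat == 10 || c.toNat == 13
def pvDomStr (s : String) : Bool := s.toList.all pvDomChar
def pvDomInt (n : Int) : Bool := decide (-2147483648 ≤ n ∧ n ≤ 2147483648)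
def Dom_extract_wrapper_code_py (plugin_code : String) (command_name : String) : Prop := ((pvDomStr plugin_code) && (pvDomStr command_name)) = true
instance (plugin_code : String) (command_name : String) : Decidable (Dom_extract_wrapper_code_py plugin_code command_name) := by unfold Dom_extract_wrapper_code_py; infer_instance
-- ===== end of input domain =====

-- B is simpler: boundary detection (first start line, first terminator at/after it) plus one slice, instead of A's flag-and-break accumulation loop.

-- shared line predicates (both Pythons test the same string conditions)
def pvIsStart (line : String) : Bool :=
  PySem.Str.startswith (PySem.Str.strip line) "def setup_execute_command" ||
  PySem.Str.startswith (PySem.Str.strip line) "def execute_command"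

def pvIsStop (line : String) : Bool :=
  PySem.Str.startswith (PySem.Str.strip line) "if __name__"

-- ===== PORT A =====
-- the for-loop with the in_command_section flag and the break
def extractLoopA : List String → List String → Bool → List String
  | [], acc, _ => acc
  | l :: rest, acc, inSec =>
    let inSec' := if pvIsStart l then true else inSec
    if inSec' then
      let acc' := acc ++ [l]
      if pvIsStop l then acc' else extractLoopA rest acc' inSec'
    else extractLoopA rest acc inSec'

def extract_wrapper_code_py (plugin_code : String) (command_name : String) : String :=
  PySem.Str.join "\n" (extractLoopA ((PySem.Str.split? plugin_code "\n").getD []) [] false)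

-- ===== PORT B =====
def extract_wrapper_code_py_alt (plugin_code : String) (command_name : String) : String :=
  let lines := (PySem.Str.split? plugin_code "\n").getD []
  match lines.findIdx? pvIsStart with
  | none => ""
  | some start =>
    let tail : List String := lines.drop start
    let sect := match tail.findIdx? pvIsStop with
      | none => tail
      | some e => tail.take (e + 1)
    PySem.Str.join "\n" sect

-- ===== PRECONDITION & SPEC =====
def Spec_extract_wrapper_code_py (plugin_code : String) (command_name : String) (out : String) : Prop := out = extract_wrapper_code_py_alt plugin_code command_name
instance (plugin_code : String) (command_name : String) (out : String) : Decidable (Spec_extract_wrapper_code_py plugin_code command_name out) := by unfold Spec_extract_wrapper_code_py; infer_instance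

-- ===== CLAIM (what is proved, stated in full; the proofs are below) =====
def Claim_equal_extract_wrapper_code_py : Prop := ∀ (plugin_code : String) (command_name : String), Dom_extract_wrapper_code_py plugin_code command_name → Spec_extract_wrapper_code_py plugin_code command_name (extract_wrapper_code_py plugin_code command_name)

-- ===== LEMMAS AND PROOFS =====

-- once the flag is set, the loop collects lines up to and including the first stop line
theorem extractLoopA_collect (xs : List String) (acc : List String) :
    extractLoopA xs acc true =
      acc ++ (match xs.findIdx? pvIsStop with
              | none => xs
              | some e => xs.take (e + 1)) := by
  induction xs generalizing acc with
  | nil => simp [extractLoopA]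
  | cons x rest ih =>
    by_cases hq : pvIsStop x = true
    · simp [extractLoopA, hq, List.findIdx?_cons]
    · have hstep : extractLoopA (x :: rest) acc true = extractLoopA rest (acc ++ [x]) true := by
        simp [extractLoopA, hq]
      rw [hstep, ih]
      simp only [List.findIdx?_cons, hq, Bool.false_eq_true, if_false]
      cases h : rest.findIdx? pvIsStop with
      | none => simp
      | some e => simp [List.take_succ_cons]

-- before the flag is set, the loop skips to the first start line (or returns acc)
theorem extractLoopA_skip (xs : List String) (acc : List String) :
    extractLoopA xs acc false =
      (match xs.findIdx? pvIsStart with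
       | none => acc
       | some i => extractLoopA (xs.drop i) acc true) := by
  induction xs generalizing acc with
  | nil => simp [extractLoopA]
  | cons x rest ih =>
    by_cases hp : pvIsStart x = true
    · have : extractLoopA (x :: rest) acc false = extractLoopA (x :: rest) acc true := by
        simp [extractLoopA, hp]
      simp [this, List.findIdx?_cons, hp]
    · have hstep : extractLoopA (x :: rest) acc false = extractLoopA rest acc false := by
        simp [extractLoopA, hp]
      rw [hstep, ih]
      simp only [List.findIdx?_cons, hp, Bool.false_eq_true, if_false]
      cases h : rest.findIdx? pvIsStart with
      | none => simp
      | some i => simp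

-- ===== VERDICT (by name: the statement is the Claim_ definition above) =====
theorem extract_wrapper_code_py_spec : Claim_equal_extract_wrapper_code_py := by
  intro plugin_code command_name _
  unfold Spec_extract_wrapper_code_py extract_wrapper_code_py extract_wrapper_code_py_alt
  rw [extractLoopA_skip]
  cases h : ((PySem.Str.split? plugin_code "\n").getD []).findIdx? pvIsStart with
  | none => simp only [h]; decide
  | some i => simp only [h]; rw [extractLoopA_collect]; simp
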